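-- pv_equiv track=rewrite | github.com/KevinCarr42/AI-Translation-Pipeline | tests/check_for_missing_apostrophes.py | has_single_letter_word
-- ===== SOURCE A (Python) =====
-- def has_single_letter_word(text):
--     if not isinstance(text, str):
--         return False
--     words = text.split()
--     for word in words:
--         cleaned = word.strip('.,!?;:"\'-()[]{}')
--         if len(cleaned) == 1:
--             return True
--     return False
-- ===== SOURCE B (Python) =====
-- _PUNCT = set('.,!?;:"\'-()[]{}')
--
--
-- def has_single_letter_word(text):
--     # Single pass over the characters: a stripped word has length 1 exactly
--     # when the whitespace-delimited token contains exactly one non-punctuation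
--     # character; track that count per token instead of splitting/stripping.
--     if not isinstance(text, str):
--         return False
--     count = 0
--     for ch in text:
--         if ch.isspace():
--             if count == 1:
--                 return True
--             count = 0
--         elif ch not in _PUNCT:
--             count += 1
--     return count == 1
-- ===== Notes on version B (the rewrite author's own statement) =====
-- stated objective: alternative
-- what changed: Replaces split()+per-word strip() with a single character pass that counts non-punctuation characters per whitespace-delimited token (a stripped token has length 1 iff it contains exactly one non-punctuation character), building no intermediate word list; in CPython the C-implemented split/strip is faster, so this trades speed for a list-free single pass.
import Mathlib
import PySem

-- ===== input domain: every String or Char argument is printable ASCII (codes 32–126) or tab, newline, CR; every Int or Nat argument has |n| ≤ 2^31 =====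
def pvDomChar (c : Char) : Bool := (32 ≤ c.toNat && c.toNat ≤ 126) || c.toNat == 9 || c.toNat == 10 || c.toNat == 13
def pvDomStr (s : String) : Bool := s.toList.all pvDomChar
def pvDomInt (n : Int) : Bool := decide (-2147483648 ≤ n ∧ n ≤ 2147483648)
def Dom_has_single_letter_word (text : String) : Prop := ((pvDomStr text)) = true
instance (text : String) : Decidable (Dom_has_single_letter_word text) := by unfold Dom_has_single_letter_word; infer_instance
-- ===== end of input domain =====

-- B replaces split()+strip() with a single character pass counting non-punctuation
-- characters per whitespace-delimited token (objective: alternative — no intermediate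
-- word list; not claimed faster).

-- ===== PORT A =====
-- the punctuation characters of A's strip('.,!?;:"\'-()[]{}')
def pvPunct : String := ".,!?;:\"'-()[]{}"

def has_single_letter_word (text : String) : Bool :=
  -- words = text.split(); for word in words: if len(word.strip(punct)) == 1: return True; return False
  (PySem.Str.split₀ text).any (fun word =>
    PySem.Str.len (PySem.Str.stripChars word pvPunct) == 1)

-- ===== PORT B =====
-- for ch in text: if ch.isspace(): if count == 1: return True else count = 0
--                 elif ch not in PUNCT: count += 1
-- return count == 1
def pvAltGo : List Char → Nat → Bool
  | [], count => count == 1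
  | c :: rest, count =>
    if PySem.Chars.isspace c then
      if count == 1 then true else pvAltGo rest 0
    else if pvPunct.toList.contains c then pvAltGo rest count
    else pvAltGo rest (count + 1)

def has_single_letter_word_alt (text : String) : Bool :=
  pvAltGo text.toList 0

-- ===== PRECONDITION & SPEC =====
def Spec_has_single_letter_word (text : String) (out : Bool) : Prop := out = has_single_letter_word_alt text
instance (text : String) (out : Bool) : Decidable (Spec_has_single_letter_word text out) := by unfold Spec_has_single_letter_word; infer_instance

-- ===== CLAIM (what is proved, stated in full; the proofs are below) =====
def Claim_equal_has_single_letter_word : Prop := ∀ (text : String), Dom_has_single_letter_word text → Spec_has_single_letter_word text (has_single_letter_word text)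

-- ===== LEMMAS AND PROOFS =====

-- the per-token predicates: p = "is punctuation", q = "is not punctuation"
def pvP (c : Char) : Bool := pvPunct.toList.contains c
def pvQ (c : Char) : Bool := ! pvP c

-- countP pvQ is preserved by dropping a punctuation-only prefix
theorem pv_countP_dropWhile (l : List Char) :
    (l.dropWhile pvP).countP pvQ = l.countP pvQ := by
  conv_rhs => rw [← List.takeWhile_append_dropWhile (p := pvP) (l := l)]
  rw [List.countP_append]
  have h : (l.takeWhile pvP).countP pvQ = 0 := by
    rw [List.countP_eq_zero]
    intro a ha
    have := List.mem_takeWhile_imp ha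
    simp [pvQ, this]
  omega

-- the first element surviving dropWhile pvP is not punctuation
theorem pv_head?_dropWhile (l : List Char) (c : Char)
    (h : (l.dropWhile pvP).head? = some c) : pvP c = false := by
  have hne : l.dropWhile pvP ≠ [] := by
    intro hn; rw [hn] at h; simp at h
  have hhead := List.head_dropWhile_not pvP hne
  rw [List.head?_eq_some_head hne] at h
  injection h with h
  rw [← h]; exact hhead

-- a list whose first and last elements are non-punctuation has length 1
-- iff it contains exactly one non-punctuation character
theorem pv_aux (m : List Char)
    (hh : ∀ c, m.head? = some c → pvP c = false)
    (hl : ∀ c, m.getLast? = some c → pvP c = false) :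
    (m.length == 1) = (m.countP pvQ == 1) := by
  cases m with
  | nil => rfl
  | cons c rest =>
    have hqc : pvQ c = true := by simp [pvQ, hh c (by simp)]
    by_cases hrest : rest = []
    · subst hrest
      simp [hqc]
    · have hne : c :: rest ≠ [] := List.cons_ne_nil c rest
      have hlastp : pvP ((c :: rest).getLast hne) = false :=
        hl _ (List.getLast?_eq_some_getLast hne)
      have hmem : (c :: rest).getLast hne ∈ rest := by
        rw [List.getLast_cons hrest]
        exact List.getLast_mem hrest
      have h1 : 1 ≤ rest.countP pvQ :=
        List.countP_pos_iff.mpr ⟨_, hmem, by simp [pvQ, hlastp]⟩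
      have hlen : (c :: rest).length ≠ 1 := by
        have := List.length_pos_of_ne_nil hrest
        simp; omega
      have hcnt : (c :: rest).countP pvQ ≠ 1 := by
        simp only [List.countP_cons, hqc, if_true]
        omega
      rw [beq_eq_false_iff_ne.mpr hlen, beq_eq_false_iff_ne.mpr hcnt]

-- CHARACTER-LEVEL KEY LEMMA: a token strips to length 1 iff it has exactly one
-- non-punctuation character.
theorem pv_strip_len_one (w : List Char) :
    ((PySem.Chars.stripChars w pvPunct.toList).length == 1) = (w.countP pvQ == 1) := by
  have hp : (fun c => pvPunct.toList.contains c) = pvP := rfl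
  simp only [PySem.Chars.stripChars, hp, List.length_reverse]
  have hcount : (List.dropWhile pvP ((List.dropWhile pvP w).reverse)).countP pvQ
      = w.countP pvQ := by
    rw [pv_countP_dropWhile, List.countP_reverse, pv_countP_dropWhile]
  rw [← hcount]
  apply pv_aux
  · intro c hc
    exact pv_head?_dropWhile _ c hc
  · intro c hc
    obtain ⟨t, ht⟩ := List.dropWhile_suffix (l := (List.dropWhile pvP w).reverse) pvP
    have hne : List.dropWhile pvP ((List.dropWhile pvP w).reverse) ≠ [] := by
      intro hn; rw [hn] at hc; simp at hc
    have hr : ((List.dropWhile pvP w).reverse).getLast? = some c := by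
      rw [← ht, List.getLast?_append_of_ne_nil _ hne]; exact hc
    rw [List.getLast?_reverse] at hr
    exact pv_head?_dropWhile _ c hr

-- the fold/recursion correspondence between split₀.go and pvAltGo
theorem pv_main (s cur : List Char) (acc : List (List Char)) :
    (PySem.Chars.split₀.go s cur acc).any (fun w => w.countP pvQ == 1)
      = (acc.any (fun w => w.countP pvQ == 1) || pvAltGo s (cur.countP pvQ)) := by
  induction s generalizing cur acc with
  | nil =>
    by_cases hc : cur.isEmpty
    · simp [PySem.Chars.split₀.go, pvAltGo, List.isEmpty_iff.mp hc]
    · simp only [PySem.Chars.split₀.go, hc, if_neg, Bool.false_eq_true, not_false_iff]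
      simp [pvAltGo, List.countP_reverse, Bool.or_comm]
  | cons c rest ih =>
    simp only [PySem.Chars.split₀.go]
    by_cases hs : PySem.Chars.isspace c
    · by_cases hc : cur.isEmpty
      · rw [if_pos hs, if_pos hc, ih]
        have : cur = [] := List.isEmpty_iff.mp hc
        subst this
        simp [pvAltGo, hs]
      · rw [if_pos hs, if_neg hc, ih]
        simp only [pvAltGo, hs, if_pos]
        by_cases hk : cur.countP pvQ = 1
        · simp [hk, List.countP_reverse]
        · simp [beq_eq_false_iff_ne.mpr hk, List.countP_reverse, Bool.or_comm]
    · rw [if_neg hs, ih]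
      simp only [pvAltGo, hs, Bool.false_eq_true, if_neg, not_false_iff]
      by_cases hpc : pvPunct.toList.contains c
      · have hm : c ∈ pvPunct.toList := by simpa using hpc
        simp [hm, pvQ, pvP]
      · have hm : c ∉ pvPunct.toList := by simpa using hpc
        simp [hm, pvQ, pvP]

-- ===== VERDICT (by name: the statement is the Claim_ definition above) =====
theorem has_single_letter_word_spec : Claim_equal_has_single_letter_word := by
  intro text _
  unfold Spec_has_single_letter_word has_single_letter_word has_single_letter_word_alt
  have h1 : ∀ w : String,
      (PySem.Str.len (PySem.Str.stripChars w pvPunct) == 1)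
        = (w.toList.countP pvQ == 1) := by
    intro w
    rw [← pv_strip_len_one]
    simp [PySem.Str.len_eq, PySem.Str.toList_stripChars]
  calc (PySem.Str.split₀ text).any (fun word => PySem.Str.len (PySem.Str.stripChars word pvPunct) == 1)
      = (PySem.Str.split₀ text).any (fun word => word.toList.countP pvQ == 1) := by
        exact PySem.List.any_congr_mem (fun w _ => h1 w)
    _ = ((PySem.Str.split₀ text).map String.toList).any (fun w => w.countP pvQ == 1) := by
        rw [List.any_map]; rfl
    _ = (PySem.Chars.split₀ text.toList).any (fun w => w.countP pvQ == 1) := by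
        rw [PySem.Str.split₀_map_toList]
    _ = pvAltGo text.toList 0 := by
        rw [PySem.Chars.split₀, pv_main]
        rfl
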